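-- pv_equiv track=rewrite | github.com/TheBreeze129/Algorithm_Prac | 프로그래머스/2/42586. 기능개발/기능개발.py | solution
-- ===== SOURCE A (Python) =====
-- def solution(progresses, speeds):
--     answer = []
--     days = []
--     for i in range(len(progresses)):
--         last = 100 - progresses[i]
--         temp = last // speeds[i]
--         if last % speeds[i]:
--             temp += 1
--         days.append(temp)
--     for i in range(1, len(days)):
--         if days[i-1] > days[i]:
--             days[i] = days[i-1]
--     for i in sorted(list(set(days))):
--         answer.append(days.count(i))
--     return answer
-- ===== SOURCE B (Python) =====
-- def solution(progresses, speeds):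
--     # One pass: completion day, running maximum, and contiguous-run counting fused.
--     answer = []
--     top = None
--     cnt = 0
--     for p, s in zip(progresses, speeds):
--         d = -((-(100 - p)) // s)  # ceil division, Python floor semantics
--         if top is None or d > top:
--             if top is not None:
--                 answer.append(cnt)
--             top, cnt = d, 1
--         else:
--             cnt += 1
--     if top is not None:
--         answer.append(cnt)
--     return answer
-- ===== Notes on version B (the rewrite author's own statement) =====
-- stated objective: faster
-- what changed: A builds the days list, runs an in-place prefix-maximum pass, then for each sorted distinct value rescans the whole list with days.count (quadratic); B does one fused pass over zip(progresses, speeds) computing the ceil day, the running maximum, and counting contiguous runs directly.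
import Mathlib
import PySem

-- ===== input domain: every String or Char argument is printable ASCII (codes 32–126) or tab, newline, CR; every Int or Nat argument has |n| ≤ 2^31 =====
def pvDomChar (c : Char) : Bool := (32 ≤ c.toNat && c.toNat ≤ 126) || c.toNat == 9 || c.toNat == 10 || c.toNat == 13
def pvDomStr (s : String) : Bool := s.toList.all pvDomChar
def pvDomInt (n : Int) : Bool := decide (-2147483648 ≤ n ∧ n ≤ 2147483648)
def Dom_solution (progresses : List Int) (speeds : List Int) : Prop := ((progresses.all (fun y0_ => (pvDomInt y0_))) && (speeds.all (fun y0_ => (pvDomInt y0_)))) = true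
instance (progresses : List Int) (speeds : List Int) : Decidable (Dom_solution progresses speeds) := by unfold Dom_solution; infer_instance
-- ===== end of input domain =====

-- B replaces A's three passes (ceil-days list, in-place prefix-max loop, count per sorted distinct value)
-- by one fused pass that counts contiguous runs of the running maximum; objective: faster (O(n) vs O(n^2)).


-- ===== PORT A =====
def solution (progresses : List Int) (speeds : List Int) : List Int :=
  -- for i in range(len(progresses)): days.append(temp)
  let days : List Int :=
    (PySem.List.pyRange 0 progresses.length 1).foldl (fun days i =>
      let last := 100 - PySem.List.pyGetD progresses i 0
      let sp := PySem.List.pyGetD speeds i 0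
      let temp := PySem.Int.floordiv last sp
      let temp := if PySem.Int.mod last sp ≠ 0 then temp + 1 else temp
      days ++ [temp]) []
  -- for i in range(1, len(days)): if days[i-1] > days[i]: days[i] = days[i-1]
  let days :=
    (PySem.List.pyRange 1 days.length 1).foldl (fun days i =>
      if PySem.List.pyGetD days (i - 1) 0 > PySem.List.pyGetD days i 0 then
        PySem.List.pySetD days i (PySem.List.pyGetD days (i - 1) 0)
      else days) days
  -- for i in sorted(list(set(days))): answer.append(days.count(i))
  (PySem.List.sorted (PySem.Set.ofList days) (fun x => x) false).foldl
    (fun answer i => answer ++ [(PySem.List.count days i : Int)]) []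

-- ===== PORT B =====
-- state: (answer, None | (top, cnt)); one fused pass over zip(progresses, speeds)
def solution_alt (progresses : List Int) (speeds : List Int) : List Int :=
  let st := (progresses.zip speeds).foldl
    (fun (st : List Int × Option (Int × Int)) ps =>
      let d := -(PySem.Int.floordiv (-(100 - ps.1)) ps.2)
      match st.2 with
      | none => (st.1, some (d, 1))
      | some (top, cnt) =>
        if d > top then (st.1 ++ [cnt], some (d, 1))
        else (st.1, some (top, cnt + 1)))
    ([], none)
  match st.2 with
  | none => st.1
  | some (_, cnt) => st.1 ++ [cnt]

-- ===== PRECONDITION & SPEC =====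
-- A raises IndexError when speeds is shorter than progresses and ZeroDivisionError when a used speed is 0;
-- Pre_ excludes exactly those inputs.
def Pre_solution (progresses : List Int) (speeds : List Int) : Prop :=
  progresses.length ≤ speeds.length ∧ ∀ s ∈ speeds.take progresses.length, s ≠ 0
instance (progresses : List Int) (speeds : List Int) : Decidable (Pre_solution progresses speeds) := by unfold Pre_solution; infer_instance
def pvWitness_solution : List Int × List Int := ([93, 30, 55], [1, 30, 5])

def Spec_solution (progresses : List Int) (speeds : List Int) (out : List Int) : Prop := out = solution_alt progresses speeds
instance (progresses : List Int) (speeds : List Int) (out : List Int) : Decidable (Spec_solution progresses speeds out) := by unfold Spec_solution; infer_instance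

-- ===== CLAIM (what is proved, stated in full; the proofs are below) =====
def Claim_equal_solution : Prop := ∀ (progresses : List Int) (speeds : List Int), Dom_solution progresses speeds → Pre_solution progresses speeds → Spec_solution progresses speeds (solution progresses speeds)

-- ===== LEMMAS AND PROOFS =====

-- the completion day of one job, as B computes it (ceiling division)
def dayf (p s : Int) : Int := -(PySem.Int.floordiv (-(100 - p)) s)

-- running maximum of a list, seeded with m
def cummax (m : Int) : List Int → List Int
  | [] => []
  | x :: xs => (max m x) :: cummax (max m x) xs

-- run counter: cnt jobs in the current batch whose day is top
def go (top cnt : Int) : List Int → List Int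
  | [] => [cnt]
  | d :: ds => if d > top then cnt :: go d 1 ds else go top (cnt + 1) ds

-- run-length encoding of a (nondecreasing) list
def rleB : List Int → List Int
  | [] => []
  | x :: xs => go x 1 xs

-- adjacent dedup
def dedupAdj : List Int → List Int
  | [] => []
  | [x] => [x]
  | x :: y :: t => if x = y then dedupAdj (y :: t) else x :: dedupAdj (y :: t)

-- (1) A's ceil-by-cases equals B's negated floor division
theorem ceil_eq_pos (a b : Int) (hb : 0 < b) :
    (if PySem.Int.mod a b ≠ 0 then PySem.Int.floordiv a b + 1 else PySem.Int.floordiv a b)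
      = -(PySem.Int.floordiv (-a) b) := by
  have h := PySem.Int.floordiv_mul_add_mod a b
  have h1 := PySem.Int.mod_nonneg a hb
  have h2 := PySem.Int.mod_lt a hb
  refine ((PySem.Int.neg_floordiv_neg_eq_iff_of_pos hb).mpr ?_).symm
  by_cases hz : PySem.Int.mod a b = 0
  · simp only [hz, ne_eq, not_true_eq_false, if_neg, not_false_eq_true]
    constructor <;> nlinarith
  · have hr : 0 < PySem.Int.mod a b := lt_of_le_of_ne h1 (Ne.symm hz)
    simp only [hz, ne_eq, not_false_eq_true, if_pos]
    constructor <;> nlinarith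

theorem ceil_eq (a b : Int) (hb : b ≠ 0) :
    (if PySem.Int.mod a b ≠ 0 then PySem.Int.floordiv a b + 1 else PySem.Int.floordiv a b)
      = -(PySem.Int.floordiv (-a) b) := by
  rcases lt_or_gt_of_ne hb with hneg | hpos
  · have h := ceil_eq_pos (-a) (-b) (by omega)
    rw [PySem.Int.mod_neg_neg, PySem.Int.floordiv_neg_neg, neg_neg] at h
    have h2 : PySem.Int.floordiv a (-b) = PySem.Int.floordiv (-a) b := by
      rw [← PySem.Int.floordiv_neg_neg (-a) b, neg_neg]
    rw [h2] at h
    simpa using h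
  · exact ceil_eq_pos a b hpos

-- (2) A's first loop builds zipWith dayf
theorem daysA_eq (p s : List Int) (hlen : p.length ≤ s.length)
    (hnz : ∀ x ∈ s.take p.length, x ≠ 0) :
    (PySem.List.pyRange 0 p.length 1).foldl (fun days i =>
      let last := 100 - PySem.List.pyGetD p i 0
      let sp := PySem.List.pyGetD s i 0
      let temp := PySem.Int.floordiv last sp
      let temp := if PySem.Int.mod last sp ≠ 0 then temp + 1 else temp
      days ++ [temp]) []
      = List.zipWith dayf p s := by
  rw [show (fun (days : List Int) (i : Int) =>
      let last := 100 - PySem.List.pyGetD p i 0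
      let sp := PySem.List.pyGetD s i 0
      let temp := PySem.Int.floordiv last sp
      let temp := if PySem.Int.mod last sp ≠ 0 then temp + 1 else temp
      days ++ [temp])
    = (fun (days : List Int) (i : Int) => days ++ [(fun i =>
        if PySem.Int.mod (100 - PySem.List.pyGetD p i 0) (PySem.List.pyGetD s i 0) ≠ 0 then
          PySem.Int.floordiv (100 - PySem.List.pyGetD p i 0) (PySem.List.pyGetD s i 0) + 1
        else
          PySem.Int.floordiv (100 - PySem.List.pyGetD p i 0) (PySem.List.pyGetD s i 0)) i]) from rfl,
    PySem.List.foldl_append_singleton_eq_map, List.nil_append]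
  apply List.ext_getElem
  · simp [PySem.List.length_pyRange_one, List.length_zipWith]
    omega
  · intro k hk1 hk2
    have hkp : k < p.length := by
      simp [PySem.List.length_pyRange_one] at hk1; omega
    have hks : k < s.length := by omega
    have hnzk : s[k] ≠ 0 := hnz _ (by
      have h1 : k < (s.take p.length).length := by simp; omega
      have h2 : (s.take p.length)[k]'h1 = s[k] := List.getElem_take
      exact h2 ▸ List.getElem_mem h1)
    simp only [List.getElem_map, PySem.List.getElem_pyRange_one, zero_add,
      List.getElem_zipWith, dayf]
    rw [show ((k : Int)) = ((k : Nat) : Int) from rfl, PySem.List.pyGetD_natCast,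
      PySem.List.pyGetD_natCast, List.getD_eq_getElem p 0 hkp, List.getD_eq_getElem s 0 hks]
    exact ceil_eq _ _ hnzk

-- (3) A's second loop is the running maximum
theorem cummaxFold (rest : List Int) : ∀ (pre : List Int) (h : pre ≠ []),
    (PySem.List.pyRange pre.length (pre.length + rest.length) 1).foldl (fun days i =>
      if PySem.List.pyGetD days (i - 1) 0 > PySem.List.pyGetD days i 0 then
        PySem.List.pySetD days i (PySem.List.pyGetD days (i - 1) 0)
      else days) (pre ++ rest)
      = pre ++ cummax (pre.getLast h) rest := by
  induction rest with
  | nil =>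
    intro pre h
    rw [PySem.List.pyRange_one_eq_nil (by simp)]
    simp [cummax]
  | cons r rs ih =>
    intro pre h
    have hlt : (pre.length : Int) < pre.length + (r :: rs).length := by simp
    rw [PySem.List.pyRange_one_cons hlt]
    simp only [List.foldl_cons]
    have hget1 : PySem.List.pyGetD (pre ++ r :: rs) ((pre.length : Int) - 1) 0 = pre.getLast h := by
      have hp : 0 < pre.length := List.length_pos_iff.mpr h
      have : ((pre.length : Int) - 1) = ((pre.length - 1 : Nat) : Int) := by omega
      rw [this, PySem.List.pyGetD_natCast]
      rw [List.getD_eq_getElem _ 0 (by simp; omega)]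
      rw [List.getElem_append_left (by omega)]
      exact (List.getLast_eq_getElem h).symm
    have hget2 : PySem.List.pyGetD (pre ++ r :: rs) ((pre.length : Int)) 0 = r := by
      rw [PySem.List.pyGetD_natCast, List.getD_eq_getElem _ 0 (by simp)]
      simp
    have hstep : (if PySem.List.pyGetD (pre ++ r :: rs) ((pre.length : Int) - 1) 0 >
          PySem.List.pyGetD (pre ++ r :: rs) ((pre.length : Int)) 0 then
        PySem.List.pySetD (pre ++ r :: rs) (pre.length : Int)
          (PySem.List.pyGetD (pre ++ r :: rs) ((pre.length : Int) - 1) 0)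
      else pre ++ r :: rs)
        = (pre ++ [max (pre.getLast h) r]) ++ rs := by
      rw [hget1, hget2, PySem.List.pySetD_natCast]
      by_cases hc : pre.getLast h > r
      · rw [if_pos hc, List.set_append_right _ _ (le_refl _)]
        simp [max_eq_left (le_of_lt hc)]
      · rw [if_neg hc]
        simp [max_eq_right (not_lt.mp hc)]
    rw [hstep]
    have hlen' : ((pre ++ [max (pre.getLast h) r]).length : Int) = (pre.length : Int) + 1 := by simp
    have hne' : pre ++ [max (pre.getLast h) r] ≠ [] := by simp
    have := ih (pre ++ [max (pre.getLast h) r]) hne'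
    rw [hlen'] at this
    have harg : (pre.length : Int) + 1 + (rs.length : Int) = (pre.length : Int) + ((r :: rs).length : Int) := by
      simp; omega
    rw [harg] at this
    rw [this]
    have hlast : (pre ++ [max (pre.getLast h) r]).getLast hne' = max (pre.getLast h) r := by
      simp
    rw [hlast]
    simp [cummax]

-- (4) cummax output is nondecreasing and bounded below by its seed
theorem cummax_le_pairwise (ds : List Int) : ∀ m : Int,
    (∀ v ∈ cummax m ds, m ≤ v) ∧ (cummax m ds).Pairwise (· ≤ ·) := by
  induction ds with
  | nil => intro m; simp [cummax]
  | cons x xs ih =>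
    intro m
    obtain ⟨h1, h2⟩ := ih (max m x)
    refine ⟨?_, ?_⟩
    · intro v hv
      rcases List.mem_cons.mp hv with rfl | hv
      · exact le_max_left _ _
      · exact le_trans (le_max_left _ _) (h1 v hv)
    · exact List.pairwise_cons.mpr ⟨fun v hv => h1 v hv, h2⟩

-- (5) dedupAdj keeps membership
theorem mem_dedupAdj (l : List Int) (v : Int) : v ∈ dedupAdj l ↔ v ∈ l := by
  induction l using dedupAdj.induct with
  | case1 => simp [dedupAdj]
  | case2 x => simp [dedupAdj]
  | case3 y t ih =>
    simp only [dedupAdj, if_true]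
    rw [ih]
    simp only [List.mem_cons]
    tauto
  | case4 x y t hne ih =>
    simp only [dedupAdj, if_neg hne, List.mem_cons]
    rw [ih]
    simp [List.mem_cons]

-- (6) dedupAdj of a nondecreasing list is strictly increasing
theorem dedupAdj_pairwise_lt (l : List Int) (h : l.Pairwise (· ≤ ·)) :
    (dedupAdj l).Pairwise (· < ·) := by
  induction l using dedupAdj.induct with
  | case1 => simp [dedupAdj]
  | case2 x => simp [dedupAdj]
  | case3 y t ih =>
    simp only [dedupAdj, if_true]
    exact ih (List.Pairwise.sublist (List.sublist_cons_self _ _) h)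
  | case4 x y t hne ih =>
    simp only [dedupAdj, if_neg hne]
    obtain ⟨hx, hyt⟩ := List.pairwise_cons.mp h
    refine List.pairwise_cons.mpr ⟨?_, ih hyt⟩
    intro v hv
    have hvm : v ∈ y :: t := (mem_dedupAdj _ _).mp hv
    have hxy : x < y := lt_of_le_of_ne (hx y (List.mem_cons_self)) hne
    rcases List.mem_cons.mp hvm with rfl | hvt
    · exact hxy
    · exact lt_of_lt_of_le hxy ((List.pairwise_cons.mp hyt).1 v hvt)

-- (7) sorted(set(m)) = dedupAdj m for nondecreasing m
theorem sorted_set_eq_dedupAdj (m : List Int) (h : m.Pairwise (· ≤ ·)) :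
    PySem.List.sorted (PySem.Set.ofList m) (fun x => x) false = dedupAdj m := by
  apply PySem.List.sorted_eq_of_perm_of_pairwise_lt
  · rw [List.perm_ext_iff_of_nodup
      ((dedupAdj_pairwise_lt m h).imp (fun hab => ne_of_lt hab))
      (PySem.Set.nodup_ofList m)]
    intro a
    rw [mem_dedupAdj, PySem.Set.mem_ofList]
  · exact dedupAdj_pairwise_lt m h

-- (8) head decomposition of dedupAdj on a nondecreasing list
theorem dedupAdj_cons (xs : List Int) : ∀ x : Int, (x :: xs).Pairwise (· ≤ ·) →
    dedupAdj (x :: xs) = x :: dedupAdj (xs.dropWhile (· == x)) := by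
  induction xs with
  | nil => intro x _; simp [dedupAdj]
  | cons y t ih =>
    intro x h
    by_cases hxy : x = y
    · subst hxy
      simp only [dedupAdj, if_true]
      rw [List.dropWhile_cons_of_pos (by simp)]
      exact ih x (List.pairwise_cons.mp h).2
    · simp only [dedupAdj, if_neg hxy]
      rw [List.dropWhile_cons_of_neg (by simp [Ne.symm hxy])]

-- (9) go counts the runs (count form)
theorem go_eq_count (xs : List Int) : ∀ (x cnt : Int), (x :: xs).Pairwise (· ≤ ·) →
    go x cnt xs = (cnt + (xs.count x : Int)) :: rleB (xs.dropWhile (· == x)) := by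
  induction xs with
  | nil => intro x cnt _; simp [go, rleB]
  | cons y t ih =>
    intro x cnt h
    obtain ⟨hx, hyt⟩ := List.pairwise_cons.mp h
    by_cases hgt : y > x
    · simp only [go, if_pos hgt]
      have hc : (y :: t).count x = 0 := by
        rw [List.count_eq_zero]
        intro hmem
        rcases List.mem_cons.mp hmem with rfl | hmt
        · exact absurd hgt (lt_irrefl x)
        · exact absurd ((List.pairwise_cons.mp hyt).1 x hmt) (by omega)
      rw [hc, List.dropWhile_cons_of_neg (by simp; omega)]
      simp [rleB]
    · have hxy : y = x := le_antisymm (not_lt.mp hgt) (hx y List.mem_cons_self)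
      subst hxy
      simp only [go, if_neg hgt]
      have hpt : (y :: t).Pairwise (· ≤ ·) := by
        refine List.pairwise_cons.mpr ⟨?_, (List.pairwise_cons.mp hyt).2⟩
        intro v hv
        exact hx v (List.mem_cons_of_mem y hv)
      rw [ih y (cnt + 1) hpt]
      rw [List.count_cons_self, List.dropWhile_cons_of_pos (by simp)]
      congr 1
      push_cast
      ring

-- (10) main counting lemma: sorted-distinct counts = run lengths, on nondecreasing lists
theorem counts_eq_rleB_aux (n : Nat) : ∀ (m : List Int), m.length ≤ n → m.Pairwise (· ≤ ·) →
    (dedupAdj m).map (fun v => ((m.count v : Nat) : Int)) = rleB m := by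
  induction n with
  | zero =>
    intro m hlen _
    have : m = [] := List.eq_nil_of_length_eq_zero (Nat.le_zero.mp hlen)
    subst this
    simp [dedupAdj, rleB]
  | succ n ih =>
    intro m hlen h
    match m with
    | [] => simp [dedupAdj, rleB]
    | x :: xs =>
      obtain ⟨hx, hpxs⟩ := List.pairwise_cons.mp h
      have hsub : (xs.dropWhile (· == x)).Sublist xs := List.dropWhile_sublist _
      have hpxs' : (xs.dropWhile (· == x)).Pairwise (· ≤ ·) := hpxs.sublist hsub
      -- every element of the dropped-to suffix is strictly above x
      have hlt : ∀ v ∈ xs.dropWhile (· == x), x < v := by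
        rcases hds : xs.dropWhile (· == x) with _ | ⟨hd, tl⟩
        · simp
        · have h1 := List.head_dropWhile_not (· == x) (l := xs) (by rw [hds]; simp)
          simp only [hds, List.head_cons] at h1
          have hhdm : hd ∈ xs := (hds ▸ hsub).mem List.mem_cons_self
          have hxhd : x < hd := lt_of_le_of_ne (hx hd hhdm) (fun hcon => by
            rw [← hcon] at h1; simp at h1)
          intro v hv
          rcases List.mem_cons.mp hv with rfl | hvt
          · exact hxhd
          · have hp' := hds ▸ hpxs'
            exact lt_of_lt_of_le hxhd ((List.pairwise_cons.mp hp').1 v hvt)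
      -- counts over the whole list agree with counts over the suffix for those values
      have hcnt : ∀ v ∈ dedupAdj (xs.dropWhile (· == x)),
          (x :: xs).count v = (xs.dropWhile (· == x)).count v := by
        intro v hv
        have hvlt : x < v := hlt v ((mem_dedupAdj _ _).mp hv)
        conv_lhs => rw [show x :: xs = x :: (xs.takeWhile (· == x) ++ xs.dropWhile (· == x)) by
          rw [List.takeWhile_append_dropWhile]]
        rw [List.count_cons_of_ne (by omega), List.count_append,
          List.count_eq_zero.mpr (fun hmem => by
            have := List.mem_takeWhile_imp hmem
            simp only [beq_iff_eq] at this
            omega), Nat.zero_add]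
      have hlen' : (xs.dropWhile (· == x)).length ≤ n := by
        have := hsub.length_le
        simp at hlen
        omega
      rw [dedupAdj_cons xs x h, List.map_cons, List.map_congr_left (l := dedupAdj (xs.dropWhile (· == x)))
        (f := fun v => (((x :: xs).count v : Nat) : Int))
        (g := fun v => (((xs.dropWhile (· == x)).count v : Nat) : Int))
        (fun v hv => by simp only [hcnt v hv]),
        ih (xs.dropWhile (· == x)) hlen' hpxs']
      show _ :: _ = rleB (x :: xs)
      rw [show rleB (x :: xs) = go x 1 xs from rfl, go_eq_count xs x 1 h]
      congr 1
      rw [List.count_cons_self]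
      push_cast
      ring

theorem counts_eq_rleB (m : List Int) (h : m.Pairwise (· ≤ ·)) :
    (dedupAdj m).map (fun v => ((m.count v : Nat) : Int)) = rleB m :=
  counts_eq_rleB_aux m.length m (le_refl _) h

-- (11) go only sees the running maximum
theorem go_cummax (ds : List Int) : ∀ top cnt : Int, go top cnt ds = go top cnt (cummax top ds) := by
  induction ds with
  | nil => intro top cnt; simp [cummax]
  | cons d ds ih =>
    intro top cnt
    by_cases hd : d > top
    · simp only [go, cummax, max_eq_right (le_of_lt hd), if_pos hd]
      rw [ih d 1]
    · simp only [go, cummax, max_eq_left (not_lt.mp hd), if_neg hd, if_neg (lt_irrefl top)]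
      rw [ih top (cnt + 1)]

-- (12) B's fold step and final flush, named for the proofs
def bstep (st : List Int × Option (Int × Int)) (d : Int) : List Int × Option (Int × Int) :=
  match st.2 with
  | none => (st.1, some (d, 1))
  | some (top, cnt) => if d > top then (st.1 ++ [cnt], some (d, 1)) else (st.1, some (top, cnt + 1))

def flush : List Int × Option (Int × Int) → List Int
  | (a, none) => a
  | (a, some (_, c)) => a ++ [c]

theorem altFold (ds : List Int) : ∀ (ans : List Int) (top cnt : Int),
    flush (ds.foldl bstep (ans, some (top, cnt))) = ans ++ go top cnt ds := by
  induction ds with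
  | nil => intro ans top cnt; simp [go, flush]
  | cons d ds ih =>
    intro ans top cnt
    simp only [List.foldl_cons]
    by_cases hd : d > top
    · rw [show bstep (ans, some (top, cnt)) d = (ans ++ [cnt], some (d, 1)) by
        simp [bstep, hd]]
      rw [ih (ans ++ [cnt]) d 1]
      simp [go, hd]
    · rw [show bstep (ans, some (top, cnt)) d = (ans, some (top, cnt + 1)) by
        simp [bstep, hd]]
      rw [ih ans top (cnt + 1)]
      simp [go, hd]

theorem zip_map_eq_zipWith (p : List Int) : ∀ s : List Int,
    (p.zip s).map (fun q => dayf q.1 q.2) = List.zipWith dayf p s := by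
  induction p with
  | nil => intro s; simp
  | cons a p ih =>
    intro s
    cases s with
    | nil => simp
    | cons b s => simp [ih s]

-- (13) B computes rleB of the running-maximum list
theorem alt_eq_rleB (p s : List Int) :
    solution_alt p s = rleB (match List.zipWith dayf p s with
      | [] => []
      | x :: xs => x :: cummax x xs) := by
  have hflush : ∀ st : List Int × Option (Int × Int),
      (match st.2 with
       | none => st.1
       | some (_, cnt) => st.1 ++ [cnt]) = flush st := by
    rintro ⟨a, _ | ⟨t, c⟩⟩ <;> rfl
  have hfun : (fun (st : List Int × Option (Int × Int)) (ps : Int × Int) =>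
      let d := -(PySem.Int.floordiv (-(100 - ps.1)) ps.2)
      match st.2 with
      | none => (st.1, some (d, 1))
      | some (top, cnt) =>
        if d > top then (st.1 ++ [cnt], some (d, 1))
        else (st.1, some (top, cnt + 1)))
      = (fun st ps => bstep st (dayf ps.1 ps.2)) := by
    funext st ps
    rcases st with ⟨a, _ | ⟨top, cnt⟩⟩ <;> rfl
  have h0 : solution_alt p s
      = flush ((p.zip s).foldl (fun st ps => bstep st (dayf ps.1 ps.2)) ([], none)) := by
    unfold solution_alt
    rw [hfun, hflush]
  rw [h0, ← List.foldl_map (f := fun q : Int × Int => dayf q.1 q.2) (g := bstep), zip_map_eq_zipWith]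
  cases hz : List.zipWith dayf p s with
  | nil => simp [flush, rleB]
  | cons x xs =>
    simp only [List.foldl_cons]
    rw [show bstep ([], none) x = ([], some (x, 1)) from rfl]
    rw [altFold xs [] x 1]
    simp only [List.nil_append, rleB]
    exact go_cummax xs x 1

-- ===== VERDICT (by name: the statement is the Claim_ definition above) =====
theorem solution_spec : Claim_equal_solution := by
  intro p s _ hpre
  obtain ⟨hlen, hnz⟩ := hpre
  unfold Spec_solution solution
  dsimp only
  rw [daysA_eq p s hlen hnz, alt_eq_rleB]
  cases hz : List.zipWith dayf p s with
  | nil =>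
    rw [PySem.List.pyRange_one_eq_nil (by simp)]
    rfl
  | cons x xs =>
    have h2 := cummaxFold xs [x] (by simp)
    simp only [List.length_cons, List.length_nil, List.getLast_singleton,
      List.singleton_append, Nat.cast_one, zero_add] at h2
    rw [show (((x :: xs).length : Nat) : Int) = 1 + (xs.length : Int) by simp; omega, h2,
      PySem.List.foldl_append_singleton_eq_map
        (f := fun i => ((PySem.List.count (x :: cummax x xs) i : Nat) : Int)), List.nil_append]
    have hpm : (x :: cummax x xs).Pairwise (· ≤ ·) := by
      obtain ⟨ha, hb⟩ := cummax_le_pairwise xs x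
      exact List.pairwise_cons.mpr ⟨ha, hb⟩
    rw [sorted_set_eq_dedupAdj _ hpm]
    simp only [PySem.List.count_eq]
    exact counts_eq_rleB _ hpm
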